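-- pv_equiv track=rewrite | github.com/HumanEater69/Quanthunt | backend/pqc_utils.py | is_hybrid_pqc_crypto
-- ===== SOURCE A (Python) =====
-- HYBRID_PQC_PROFILES = [
--     {
--         "domain": "google.com",
--         "tls_version": "TLSv1.3",
--         "key_exchange_groups": ["X25519KYBER", "X25519MLKEM", "X25519KYBER768DRAFT00", "X25519MLKEM768", "X25519KYBER512DRAFT00"],
--         "kem": ["KYBER", "ML-KEM"],
--         "group_ids": ["0xfe30", "0xfe31", "0x11ec"],
--     },
--     {
--         "domain": "cloudflare.com",
--         "tls_version": "TLSv1.3",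
--         "key_exchange_groups": ["X25519KYBER", "X25519MLKEM", "X25519KYBER768DRAFT00", "X25519MLKEM768", "X25519KYBER512DRAFT00"],
--         "kem": ["KYBER", "ML-KEM"],
--         "group_ids": ["0xfe30", "0xfe31", "0x11ec"],
--     },
--     {
--         "domain": "amazon.com",
--         "tls_version": "TLSv1.3",
--         "key_exchange_groups": ["X25519KYBER", "X25519MLKEM", "X25519KYBER768DRAFT00", "X25519MLKEM768", "X25519KYBER512DRAFT00"],
--         "kem": ["KYBER", "ML-KEM"],
--         "group_ids": ["0xfe30", "0xfe31", "0x11ec"],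
--     },
--     {
--         "domain": "apple.com",
--         "tls_version": "TLSv1.3",
--         "key_exchange_groups": ["X25519KYBER", "X25519MLKEM", "X25519KYBER768DRAFT00", "X25519MLKEM768", "X25519KYBER512DRAFT00"],
--         "kem": ["KYBER", "ML-KEM"],
--         "group_ids": ["0xfe30", "0xfe31", "0x11ec"],
--     },
-- ]
--
-- def is_hybrid_pqc_crypto(tls_info: dict) -> bool:
--     """
--     Returns True if the TLS info matches any known hybrid PQC profile.
--     """
--     tls_version = str(tls_info.get("tls_version", "")).upper()
--     kex_group = str(tls_info.get("key_exchange_group", "")).upper()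
--     kem = str(tls_info.get("key_encapsulation_mechanism", "") or tls_info.get("kem", "")).upper()
--     group_id = str(tls_info.get("named_group_id", "")).lower()
--     # Fast path: check for hybrid indicators
--     if any(x in kex_group for x in ["HYBRID", "X25519KYBER", "X25519MLKEM"]):
--         return True
--     if any(x in kem for x in ["KYBER", "ML-KEM"]):
--         return True
--     if group_id in ["0xfe30", "0xfe31", "0x11ec"]:
--         return True
--     # Profile match
--     for profile in HYBRID_PQC_PROFILES:
--         if tls_version == profile["tls_version"].upper():
--             if kex_group in (x.upper() for x in profile["key_exchange_groups"]):
--                 return True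
--             if kem in (x.upper() for x in profile["kem"]):
--                 return True
--             if group_id in profile["group_ids"]:
--                 return True
--     return False
-- ===== SOURCE B (Python) =====
-- def is_hybrid_pqc_crypto(tls_info: dict) -> bool:
--     """
--     Returns True if the TLS info matches any known hybrid PQC profile.
--     """
--     kex_group = str(tls_info.get("key_exchange_group", "")).upper()
--     kem = str(tls_info.get("key_encapsulation_mechanism", "") or tls_info.get("kem", "")).upper()
--     group_id = str(tls_info.get("named_group_id", "")).lower()
--     return (
--         "HYBRID" in kex_group
--         or "X25519KYBER" in kex_group
--         or "X25519MLKEM" in kex_group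
--         or "KYBER" in kem
--         or "ML-KEM" in kem
--         or group_id in ("0xfe30", "0xfe31", "0x11ec")
--     )
-- ===== Notes on version B (the rewrite author's own statement) =====
-- stated objective: simpler
-- what changed: Dropped the two-phase fast-path-then-profile-scan: every profile kex/kem/group_id match is subsumed by the fast-path substring and membership tests (proved in Lean), so B is one flat boolean expression with no tls_version extraction and no loop over HYBRID_PQC_PROFILES.
import Mathlib
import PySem

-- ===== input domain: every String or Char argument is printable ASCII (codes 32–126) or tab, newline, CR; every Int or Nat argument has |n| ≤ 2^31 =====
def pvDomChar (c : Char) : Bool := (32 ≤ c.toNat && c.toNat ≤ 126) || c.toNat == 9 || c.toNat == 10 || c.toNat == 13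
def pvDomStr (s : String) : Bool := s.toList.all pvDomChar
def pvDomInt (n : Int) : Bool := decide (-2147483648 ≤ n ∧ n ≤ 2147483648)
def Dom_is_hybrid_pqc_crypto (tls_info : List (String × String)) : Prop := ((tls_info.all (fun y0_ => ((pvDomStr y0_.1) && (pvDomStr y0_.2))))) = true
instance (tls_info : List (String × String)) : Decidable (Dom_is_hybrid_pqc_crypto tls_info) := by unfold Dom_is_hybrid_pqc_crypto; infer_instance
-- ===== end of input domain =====

-- B drops A's redundant profile-scan phase (its matches are all subsumed by the fast-path tests, proved below) and is one flat boolean expression; objective: simpler.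


-- ===== PORT A =====
-- dict.get(k, "") on the association list (first match, as Python dict lookup)
def pvGet (d : List (String × String)) (k : String) : String :=
  (PySem.Dict.mk d).getD k ""

-- HYBRID_PQC_PROFILES: (domain, tls_version, key_exchange_groups, kem, group_ids)
def pvProfiles : List (String × String × List String × List String × List String) :=
  [ ("google.com", "TLSv1.3",
      ["X25519KYBER", "X25519MLKEM", "X25519KYBER768DRAFT00", "X25519MLKEM768", "X25519KYBER512DRAFT00"],
      ["KYBER", "ML-KEM"], ["0xfe30", "0xfe31", "0x11ec"]),
    ("cloudflare.com", "TLSv1.3",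
      ["X25519KYBER", "X25519MLKEM", "X25519KYBER768DRAFT00", "X25519MLKEM768", "X25519KYBER512DRAFT00"],
      ["KYBER", "ML-KEM"], ["0xfe30", "0xfe31", "0x11ec"]),
    ("amazon.com", "TLSv1.3",
      ["X25519KYBER", "X25519MLKEM", "X25519KYBER768DRAFT00", "X25519MLKEM768", "X25519KYBER512DRAFT00"],
      ["KYBER", "ML-KEM"], ["0xfe30", "0xfe31", "0x11ec"]),
    ("apple.com", "TLSv1.3",
      ["X25519KYBER", "X25519MLKEM", "X25519KYBER768DRAFT00", "X25519MLKEM768", "X25519KYBER512DRAFT00"],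
      ["KYBER", "ML-KEM"], ["0xfe30", "0xfe31", "0x11ec"]) ]

def is_hybrid_pqc_crypto (tls_info : List (String × String)) : Bool :=
  let tls_version := PySem.Str.upper (pvGet tls_info "tls_version")
  let kex_group := PySem.Str.upper (pvGet tls_info "key_exchange_group")
  -- 'a or b' with string operands: b when a is falsy (empty)
  let kem0 := pvGet tls_info "key_encapsulation_mechanism"
  let kem := PySem.Str.upper (if kem0 = "" then pvGet tls_info "kem" else kem0)
  let group_id := PySem.Str.lower (pvGet tls_info "named_group_id")
  -- fast path
  if ["HYBRID", "X25519KYBER", "X25519MLKEM"].any (fun x => PySem.Str.isIn x kex_group) then true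
  else if ["KYBER", "ML-KEM"].any (fun x => PySem.Str.isIn x kem) then true
  else if ["0xfe30", "0xfe31", "0x11ec"].contains group_id then true
  -- profile loop (for … return True, else fall through = any)
  else pvProfiles.any (fun p =>
    tls_version == PySem.Str.upper p.2.1 &&
      ((p.2.2.1.map PySem.Str.upper).contains kex_group
        || (p.2.2.2.1.map PySem.Str.upper).contains kem
        || p.2.2.2.2.contains group_id))

-- ===== PORT B =====
def is_hybrid_pqc_crypto_alt (tls_info : List (String × String)) : Bool :=
  let kex_group := PySem.Str.upper (pvGet tls_info "key_exchange_group")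
  let kem0 := pvGet tls_info "key_encapsulation_mechanism"
  let kem := PySem.Str.upper (if kem0 = "" then pvGet tls_info "kem" else kem0)
  let group_id := PySem.Str.lower (pvGet tls_info "named_group_id")
  PySem.Str.isIn "HYBRID" kex_group
    || PySem.Str.isIn "X25519KYBER" kex_group
    || PySem.Str.isIn "X25519MLKEM" kex_group
    || PySem.Str.isIn "KYBER" kem
    || PySem.Str.isIn "ML-KEM" kem
    || ["0xfe30", "0xfe31", "0x11ec"].contains group_id

-- ===== PRECONDITION & SPEC =====
def Spec_is_hybrid_pqc_crypto (tls_info : List (String × String)) (out : Bool) : Prop := out = is_hybrid_pqc_crypto_alt tls_info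
instance (tls_info : List (String × String)) (out : Bool) : Decidable (Spec_is_hybrid_pqc_crypto tls_info out) := by unfold Spec_is_hybrid_pqc_crypto; infer_instance

-- ===== CLAIM (what is proved, stated in full; the proofs are below) =====
def Claim_equal_is_hybrid_pqc_crypto : Prop := ∀ (tls_info : List (String × String)), Dom_is_hybrid_pqc_crypto tls_info → Spec_is_hybrid_pqc_crypto tls_info (is_hybrid_pqc_crypto tls_info)

-- ===== LEMMAS AND PROOFS =====

-- ===== VERDICT (by name: the statement is the Claim_ definition above) =====
theorem is_hybrid_pqc_crypto_spec : Claim_equal_is_hybrid_pqc_crypto := by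
  intro tls_info _
  unfold Spec_is_hybrid_pqc_crypto is_hybrid_pqc_crypto is_hybrid_pqc_crypto_alt
  simp only [pvProfiles, List.any_cons, List.any_nil]
  set kex := PySem.Str.upper (pvGet tls_info "key_exchange_group") with hkex
  set kem := PySem.Str.upper (if pvGet tls_info "key_encapsulation_mechanism" = "" then pvGet tls_info "kem" else pvGet tls_info "key_encapsulation_mechanism") with hkem
  set gid := PySem.Str.lower (pvGet tls_info "named_group_id") with hgid
  by_cases ha : PySem.Str.isIn "HYBRID" kex = true
  · simp_all
  rw [Bool.not_eq_true] at ha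
  by_cases hb : PySem.Str.isIn "X25519KYBER" kex = true
  · simp_all
  rw [Bool.not_eq_true] at hb
  by_cases hc : PySem.Str.isIn "X25519MLKEM" kex = true
  · simp_all
  rw [Bool.not_eq_true] at hc
  by_cases hd : PySem.Str.isIn "KYBER" kem = true
  · simp_all
  rw [Bool.not_eq_true] at hd
  by_cases he : PySem.Str.isIn "ML-KEM" kem = true
  · simp_all
  rw [Bool.not_eq_true] at he
  by_cases hg1 : gid = "0xfe30"
  · simp_all
  by_cases hg2 : gid = "0xfe31"
  · simp_all
  by_cases hg3 : gid = "0x11ec"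
  · simp_all
  -- all fast-path tests are false; show the profile scan is false too:
  -- a kex/kem equal to a profile entry would make a fast-path substring test true
  simp at ha hb hc hd he
  have n1 : ¬ (kex = PySem.Str.upper "X25519KYBER") := by
    intro h; rw [h] at hb; exact absurd hb (by decide)
  have n2 : ¬ (kex = PySem.Str.upper "X25519MLKEM") := by
    intro h; rw [h] at hc; exact absurd hc (by decide)
  have n3 : ¬ (kex = PySem.Str.upper "X25519KYBER768DRAFT00") := by
    intro h; rw [h] at hb; exact absurd hb (by decide)
  have n4 : ¬ (kex = PySem.Str.upper "X25519MLKEM768") := by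
    intro h; rw [h] at hc; exact absurd hc (by decide)
  have n5 : ¬ (kex = PySem.Str.upper "X25519KYBER512DRAFT00") := by
    intro h; rw [h] at hb; exact absurd hb (by decide)
  have m1 : ¬ (kem = PySem.Str.upper "KYBER") := by
    intro h; rw [h] at hd; exact absurd hd (by decide)
  have m2 : ¬ (kem = PySem.Str.upper "ML-KEM") := by
    intro h; rw [h] at he; exact absurd he (by decide)
  simp [ha, hb, hc, hd, he, hg1, hg2, hg3, n1, n2, n3, n4, n5, m1, m2]
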